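-- pv_equiv track=rewrite | github.com/Preetham-ai/Counter-sort | main.py | counter_sort
-- ===== SOURCE A (Python) =====
-- def counter_sort(lst:list) -> list:
--     counter=0
--     sorted_list=[]
--     while len(sorted_list)<=len(lst):
--         counter+=1
--         if counter in lst:
--             sorted_list.append(counter)
--         else:
--             break
--     return sorted_list
-- ===== SOURCE B (Python) =====
-- def counter_sort(lst: list) -> list:
--     out = []
--     expected = 1
--     for x in sorted(set(lst)):
--         if x < expected:
--             continue
--         if x == expected:
--             out.append(expected)
--             expected += 1
--         else:
--             break
--     return out
-- ===== Notes on version B (the rewrite author's own statement) =====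
-- stated objective: alternative
-- what changed: A enumerates candidate integers 1,2,3,... and probes the whole list with 'in' each time; B sorts the deduplicated data once and sweeps it against a rising counter in a single pass.
import Mathlib
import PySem

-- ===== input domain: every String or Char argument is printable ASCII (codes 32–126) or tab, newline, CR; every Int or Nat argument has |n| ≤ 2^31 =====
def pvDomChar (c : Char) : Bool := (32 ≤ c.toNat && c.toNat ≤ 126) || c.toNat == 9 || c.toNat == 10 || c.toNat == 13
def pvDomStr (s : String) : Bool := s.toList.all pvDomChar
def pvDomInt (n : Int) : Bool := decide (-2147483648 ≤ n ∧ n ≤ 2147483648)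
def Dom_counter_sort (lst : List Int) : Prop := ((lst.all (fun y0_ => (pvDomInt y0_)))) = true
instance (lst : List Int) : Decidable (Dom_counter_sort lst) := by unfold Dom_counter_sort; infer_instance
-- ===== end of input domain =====

-- B replaces A's "enumerate 1,2,3,… and probe the list with 'in' each time" by one
-- sweep of sorted(set(lst)) against a rising counter (objective: alternative algorithm).

-- ===== PORT A =====
-- the while loop: state (counter, sorted_list); terminates because each append grows sorted_list
def counterLoopA (lst : List Int) (counter : Int) (sortedList : List Int) : List Int :=
  if sortedList.length ≤ lst.length then
    if (counter + 1) ∈ lst then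
      counterLoopA lst (counter + 1) (sortedList ++ [counter + 1])
    else sortedList
  else sortedList
termination_by lst.length + 1 - sortedList.length
decreasing_by simp; omega

def counter_sort (lst : List Int) : List Int :=
  counterLoopA lst 0 []

-- ===== PORT B =====
-- the for loop over sorted(set(lst)) with continue/append/break
def counterLoopB (s : List Int) (expected : Int) (out : List Int) : List Int :=
  match s with
  | [] => out
  | x :: rest =>
    if x < expected then counterLoopB rest expected out
    else if x = expected then counterLoopB rest (expected + 1) (out ++ [expected])
    else out

def counter_sort_alt (lst : List Int) : List Int :=
  counterLoopB (PySem.List.sorted (PySem.Set.ofList lst) (fun x => x) false) 1 []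

-- ===== PRECONDITION & SPEC =====
def Spec_counter_sort (lst : List Int) (out : List Int) : Prop := out = counter_sort_alt lst
instance (lst : List Int) (out : List Int) : Decidable (Spec_counter_sort lst out) := by unfold Spec_counter_sort; infer_instance

-- ===== CLAIM (what is proved, stated in full; the proofs are below) =====
def Claim_equal_counter_sort : Prop := ∀ (lst : List Int), Dom_counter_sort lst → Spec_counter_sort lst (counter_sort lst)

-- ===== LEMMAS AND PROOFS =====

-- the common value: the run e, e+1, … of members of lst, with fuel n
def chainB (lst : List Int) : Int → Nat → List Int
  | _, 0 => []
  | e, n + 1 => if e ∈ lst then e :: chainB lst (e + 1) n else []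

theorem loopA_eq (lst : List Int) :
    ∀ (n : Nat) (c : Int) (acc : List Int), n = lst.length + 1 - acc.length →
      counterLoopA lst c acc = acc ++ chainB lst (c + 1) n := by
  intro n
  induction n with
  | zero =>
    intro c acc h
    rw [counterLoopA, if_neg (by omega), chainB]
    simp
  | succ m ih =>
    intro c acc h
    rw [counterLoopA, if_pos (by omega), chainB]
    by_cases hm : (c + 1) ∈ lst
    · rw [if_pos hm, if_pos hm, ih (c + 1) (acc ++ [c + 1]) (by simp; omega)]
      simp
    · rw [if_neg hm, if_neg hm]
      simp

theorem loopB_acc (s : List Int) :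
    ∀ (e : Int) (acc : List Int), counterLoopB s e acc = acc ++ counterLoopB s e [] := by
  induction s with
  | nil => intro e acc; simp [counterLoopB]
  | cons x rest ih =>
    intro e acc
    rw [counterLoopB, counterLoopB]
    by_cases h1 : x < e
    · rw [if_pos h1, if_pos h1, ih]
    · rw [if_neg h1, if_neg h1]
      by_cases h2 : x = e
      · rw [if_pos h2, if_pos h2, ih (e + 1) ([] ++ [e]), ih (e + 1) (acc ++ [e])]
        simp
      · rw [if_neg h2, if_neg h2]; simp

theorem loopB_eq (lst : List Int) :
    ∀ (s : List Int), s.Pairwise (· < ·) →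
      ∀ (e : Int) (n : Nat), (∀ y : Int, e ≤ y → (y ∈ s ↔ y ∈ lst)) → s.length < n →
        counterLoopB s e [] = chainB lst e n := by
  intro s
  induction s with
  | nil =>
    intro _ e n hmem hn
    have he : e ∉ lst := by
      intro h; exact absurd ((hmem e le_rfl).mpr h) (by simp)
    cases n with
    | zero => simp at hn
    | succ m => rw [counterLoopB, chainB, if_neg he]
  | cons x rest ih =>
    intro hp e n hmem hn
    have hpr : rest.Pairwise (· < ·) := hp.tail
    have hgt : ∀ y ∈ rest, x < y := fun y hy => List.rel_of_pairwise_cons hp hy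
    cases n with
    | zero => simp at hn
    | succ m =>
      rw [counterLoopB, chainB]
      by_cases h1 : x < e
      · rw [if_pos h1]
        have : counterLoopB rest e [] = chainB lst e (m + 1) := by
          apply ih hpr e (m + 1)
          · intro y hy
            rw [← hmem y hy]
            constructor
            · intro h; exact List.mem_cons_of_mem x h
            · intro h
              rcases List.mem_cons.mp h with h | h
              · omega
              · exact h
          · simp at hn ⊢; omega
        rw [this, chainB]
      · rw [if_neg h1]
        by_cases h2 : x = e
        · have he : e ∈ lst := (hmem e le_rfl).mp (by rw [h2] at *; exact List.mem_cons_self)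
          rw [if_pos h2, if_pos he, loopB_acc]
          have : counterLoopB rest (e + 1) [] = chainB lst (e + 1) m := by
            apply ih hpr (e + 1) m
            · intro y hy
              rw [← hmem y (by omega)]
              constructor
              · intro h; exact List.mem_cons_of_mem x h
              · intro h
                rcases List.mem_cons.mp h with h | h
                · omega
                · exact h
            · simp at hn; omega
          rw [this]
          simp
        · -- x > e : e is in neither x::rest nor lst
          have he : e ∉ lst := by
            intro h
            have := (hmem e le_rfl).mpr h
            rcases List.mem_cons.mp this with h' | h'
            · exact h2 h'.symm
            · have := hgt e h'; omega
          rw [if_neg h2, if_neg he]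

-- ===== VERDICT (by name: the statement is the Claim_ definition above) =====
theorem counter_sort_spec : Claim_equal_counter_sort := by
  intro lst _
  unfold Spec_counter_sort counter_sort counter_sort_alt
  rw [loopA_eq lst (lst.length + 1) 0 [] (by simp)]
  set s := PySem.List.sorted (PySem.Set.ofList lst) (fun x => x) false with hs
  have hlen : s.length < lst.length + 1 := by
    rw [hs, PySem.List.length_sorted]
    have := PySem.Set.length_ofList_le (xs := lst)
    omega
  rw [loopB_eq lst s (PySem.List.sorted_ofList_pairwise_lt lst) 1 (lst.length + 1)
      (fun y _ => by rw [hs, PySem.List.mem_sorted, PySem.Set.mem_ofList]) hlen]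
  simp
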